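-- pv_equiv track=rewrite | github.com/hhocquard/LaboBlayePython | Parcours6.py | memeCote
-- ===== SOURCE A (Python) =====
-- def deter(A, B, C):
--     # cette fonction prend comme arguments trois listes representant les
--     # coordonnees de trois points A, B et C, et renvoie la valeur de l'expression
--     # (XB - XA)(YC - YA) - (YB - YA)(XC - XA)
--
--     return (B[0] - A[0]) * (C[1] - A[1]) - (B[1] - A[1]) * (C[0] - A[0])
--
-- def memeCote(L, i, j):
--     # cette fonction prend comme arguments une liste de listes representant
--     # les coordonnees d'un ensemble de points P1, ..., Pn et deux indices i et j,
--     # puis determine si tous les points autres que Pi Pj sont du meme cote de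
--     # la droite determinee par ces deux points
--     #
--     # necessite la fonction deter
--
--     # on commence par determiner le signe de deter, en cherchant le premier
--     # dont la valeur est non nulle...
--     k = 0
--     trouve = False
--     while k < len(L) and not trouve:
--         if (k != i) and (k != j):
--             det = deter(L[i], L[j], L[k])
--             if det != 0:
--                 trouve = True
--             else:
--                 k = k + 1
--         else:
--             k = k + 1
--
--     # si les deter n'etaient pas tous nuls...
--     if trouve:
--         estPositif = det > 0
--         # on verifie que tous les autres deter sont de meme signe
--         # si on trouve un signe different on renvoie False
--         for kk in range(k + 1, len(L)):
--             if (kk != i) and (kk != j):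
--                 if estPositif != (deter(L[i], L[j], L[kk]) > 0):
--                     return False
--             kk = kk + 1
--
--     # on a tout verifie, c'est donc ok
--     return True
-- ===== SOURCE B (Python) =====
-- def deter(A, B, C):
--     return (B[0] - A[0]) * (C[1] - A[1]) - (B[1] - A[1]) * (C[0] - A[0])
--
-- def memeCote(L, i, j):
--     # One pass: collect the determinants of all other points and decide by
--     # polarity presence; collinear points (det == 0) are ignored symmetrically.
--     dets = [deter(L[i], L[j], L[k]) for k in range(len(L)) if k != i and k != j]
--     return not (any(d > 0 for d in dets) and any(d < 0 for d in dets))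
-- ===== Notes on version B (the rewrite author's own statement) =====
-- stated objective: simpler
-- what changed: Replaces A's two-phase scan (find first nonzero determinant, then compare every later sign to it with an early return) by building the list of determinants of all other points once and deciding by polarity presence: False only if both a strictly positive and a strictly negative determinant occur.
-- intended difference: On inputs where the first nonzero determinant is positive and some later point is collinear with the line (determinant 0) while no determinant is negative, A returns False but B returns True; B's value is intended because A itself ignores collinear points when the reference sign is negative, so its False here is an asymmetric artefact of comparing 'det > 0' booleans. — e.g. on memeCote([[0, 0], [2, 0], [1, 1], [1, 0]], 0, 1): A returns false, B returns true
-- outside the precondition, e.g. on memeCote([[0, 0], [2, 0], [1, 1], [2, -1], [9]], 0, 1): A returns False, B raises IndexError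
import Mathlib
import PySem

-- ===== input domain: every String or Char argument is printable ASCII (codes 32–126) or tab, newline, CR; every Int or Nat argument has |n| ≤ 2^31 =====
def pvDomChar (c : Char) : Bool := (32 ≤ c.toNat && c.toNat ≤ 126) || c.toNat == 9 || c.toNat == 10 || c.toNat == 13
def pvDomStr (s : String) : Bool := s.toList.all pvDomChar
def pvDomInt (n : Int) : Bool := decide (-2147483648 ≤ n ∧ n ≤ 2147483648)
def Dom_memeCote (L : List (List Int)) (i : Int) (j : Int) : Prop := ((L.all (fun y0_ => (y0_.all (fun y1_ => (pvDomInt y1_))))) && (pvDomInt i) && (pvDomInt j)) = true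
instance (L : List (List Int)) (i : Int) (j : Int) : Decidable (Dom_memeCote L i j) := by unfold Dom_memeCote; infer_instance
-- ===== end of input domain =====

-- B computes all determinants once and decides by polarity presence (both a >0 and a <0 determinant
-- present ⇒ False), instead of A's two-phase 'find first nonzero sign, then compare' scan.

-- ===== PORT A =====
-- module helper `deter`; indices 0 and 1 are totalized with getD — exact under Pre_ (points have length ≥ 2)
def deterL (A B C : List Int) : Int :=
  (B.getD 0 0 - A.getD 0 0) * (C.getD 1 0 - A.getD 1 0) - (B.getD 1 0 - A.getD 1 0) * (C.getD 0 0 - A.getD 0 0)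

-- L[i] with Python wraparound, totalized — exact under Pre_ (i, j in range when a third point exists)
def pvGetPt (L : List (List Int)) (i : Int) : List Int := (PySem.List.pyGet? L i).getD []

-- A's first while loop: first k (≠ i, ≠ j) with a nonzero determinant, with that determinant
def findK (L : List (List Int)) (i j : Int) (k : Nat) : Option (Nat × Int) :=
  if k < L.length then
    if (k : Int) ≠ i ∧ (k : Int) ≠ j then
      let det := deterL (pvGetPt L i) (pvGetPt L j) (L.getD k [])
      if det ≠ 0 then some (k, det) else findK L i j (k + 1)
    else findK L i j (k + 1)
  else none
termination_by L.length - k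

-- A's second loop: compare each later sign to estPositif, early return False
def checkRest (L : List (List Int)) (i j : Int) (estPositif : Bool) (kk : Nat) : Bool :=
  if kk < L.length then
    if (kk : Int) ≠ i ∧ (kk : Int) ≠ j then
      if estPositif ≠ decide (0 < deterL (pvGetPt L i) (pvGetPt L j) (L.getD kk [])) then false
      else checkRest L i j estPositif (kk + 1)
    else checkRest L i j estPositif (kk + 1)
  else true
termination_by L.length - kk

def memeCote (L : List (List Int)) (i : Int) (j : Int) : Bool :=
  match findK L i j 0 with
  | some (k, det) => checkRest L i j (decide (0 < det)) (k + 1)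
  | none => true

-- ===== PORT B =====
-- the determinant of every point other than Pi, Pj (Source B's comprehension)
def detsOf (L : List (List Int)) (i j : Int) : List Int :=
  ((List.range L.length).filter (fun (k : Nat) => decide ((↑k : Int) ≠ i) && decide ((↑k : Int) ≠ j))).map
    (fun k => deterL (pvGetPt L i) (pvGetPt L j) (L.getD k []))

def memeCote_alt (L : List (List Int)) (i : Int) (j : Int) : Bool :=
  !((detsOf L i j).any (fun d => decide (0 < d)) && (detsOf L i j).any (fun d => decide (d < 0)))

-- ===== PRECONDITION & SPEC =====
-- Pre_ excludes exactly the inputs on which Python raises an IndexError: whenever some third point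
-- exists, i and j must be valid (possibly negative) indices and every point must have ≥ 2 coordinates.
-- This is slightly narrower than 'A returns': A can return False early before reaching a short point
-- (B evaluates every determinant and raises there) — see the cite in the claim.
def Pre_memeCote (L : List (List Int)) (i : Int) (j : Int) : Prop :=
  (∃ k ∈ List.range L.length, (k : Int) ≠ i ∧ (k : Int) ≠ j) →
    PySem.Raise.InRange L.length i ∧ PySem.Raise.InRange L.length j ∧ ∀ p ∈ L, 2 ≤ p.length
instance (L : List (List Int)) (i : Int) (j : Int) : Decidable (Pre_memeCote L i j) := by
  unfold Pre_memeCote; infer_instance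

def pvWitness_memeCote : List (List Int) × Int × Int := ([[0, 0], [2, 0], [1, 1], [3, 2]], 0, 1)

-- On inputs where the first nonzero determinant is positive and some later point is collinear
-- (determinant 0) while no determinant is negative, A returns False but B returns True; B's value is
-- intended because A itself ignores collinear points when the reference sign is negative, so A's
-- False here is an asymmetric artefact of comparing 'det > 0' booleans.
def D_memeCote (L : List (List Int)) (i : Int) (j : Int) : Prop :=
  let s := fun k => deterL (pvGetPt L i) (pvGetPt L j) (L.getD k [])
  (∀ k < L.length, 0 ≤ s k) ∧ ∃ q < L.length, i ≠ ↑q ∧ j ≠ ↑q ∧ s q = 0 ∧ ∃ p < q, 0 < s p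
instance (L : List (List Int)) (i : Int) (j : Int) : Decidable (D_memeCote L i j) := by
  unfold D_memeCote; infer_instance

def Spec_memeCote (L : List (List Int)) (i : Int) (j : Int) (out : Bool) : Prop :=
  ¬ D_memeCote L i j → out = memeCote_alt L i j
instance (L : List (List Int)) (i : Int) (j : Int) (out : Bool) : Decidable (Spec_memeCote L i j out) := by
  unfold Spec_memeCote; infer_instance

def pvDiffWitness_memeCote : List (List Int) × Int × Int := ([[0, 0], [2, 0], [1, 1], [1, 0]], 0, 1)
def pvDiffWitnessOut_memeCote : Bool × Bool := (false, true)

-- ===== CLAIM (what is proved, stated in full; the proofs are below) =====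
def Claim_unchanged_memeCote : Prop := ∀ (L : List (List Int)) (i : Int) (j : Int), Dom_memeCote L i j → Pre_memeCote L i j → Spec_memeCote L i j (memeCote L i j)
def Claim_changed_memeCote : Prop := Dom_memeCote (pvDiffWitness_memeCote.1) (pvDiffWitness_memeCote.2.1) (pvDiffWitness_memeCote.2.2) ∧ Pre_memeCote (pvDiffWitness_memeCote.1) (pvDiffWitness_memeCote.2.1) (pvDiffWitness_memeCote.2.2) ∧ D_memeCote (pvDiffWitness_memeCote.1) (pvDiffWitness_memeCote.2.1) (pvDiffWitness_memeCote.2.2) ∧ memeCote (pvDiffWitness_memeCote.1) (pvDiffWitness_memeCote.2.1) (pvDiffWitness_memeCote.2.2) = pvDiffWitnessOut_memeCote.1 ∧ memeCote_alt (pvDiffWitness_memeCote.1) (pvDiffWitness_memeCote.2.1) (pvDiffWitness_memeCote.2.2) = pvDiffWitnessOut_memeCote.2 ∧ pvDiffWitnessOut_memeCote.1 ≠ pvDiffWitnessOut_memeCote.2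
def Claim_exact_memeCote : Prop := ∀ (L : List (List Int)) (i : Int) (j : Int), Dom_memeCote L i j → Pre_memeCote L i j → D_memeCote L i j → memeCote L i j ≠ memeCote_alt L i j

-- ===== LEMMAS AND PROOFS =====

-- abstract versions of the two results as functions of the determinant list
def aSpec (ds : List Int) : Bool :=
  match ds.dropWhile (fun d => d == 0) with
  | [] => true
  | d :: rest => rest.all (fun e => decide (0 < d) == decide (0 < e))

def bSpec (ds : List Int) : Bool :=
  !(ds.any (fun d => decide (0 < d)) && ds.any (fun d => decide (d < 0)))

def DSpec (ds : List Int) : Prop :=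
  (∀ d ∈ ds, 0 ≤ d) ∧ 0 ∈ (ds.dropWhile (fun d => d == 0)).drop 1

-- determinants of points at indices ≥ k
def detsFrom (L : List (List Int)) (i j : Int) (k : Nat) : List Int :=
  ((List.range' k (L.length - k)).filter (fun (k : Nat) => decide ((↑k : Int) ≠ i) && decide ((↑k : Int) ≠ j))).map
    (fun k => deterL (pvGetPt L i) (pvGetPt L j) (L.getD k []))

lemma detsFrom_zero (L : List (List Int)) (i j : Int) : detsFrom L i j 0 = detsOf L i j := by
  simp [detsFrom, detsOf, List.range_eq_range']

lemma detsFrom_stop (L : List (List Int)) (i j : Int) (k : Nat) (h : ¬ k < L.length) :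
    detsFrom L i j k = [] := by
  unfold detsFrom
  rw [Nat.sub_eq_zero_of_le (Nat.le_of_not_lt h)]
  rfl

lemma detsFrom_succ (L : List (List Int)) (i j : Int) (k : Nat) (h : k < L.length) :
    detsFrom L i j k =
      if (k : Int) ≠ i ∧ (k : Int) ≠ j then
        deterL (pvGetPt L i) (pvGetPt L j) (L.getD k []) :: detsFrom L i j (k + 1)
      else detsFrom L i j (k + 1) := by
  have hn : L.length - k = (L.length - (k + 1)) + 1 := by omega
  rw [detsFrom, hn, List.range'_succ, List.filter_cons]
  by_cases hk : (k : Int) ≠ i ∧ (k : Int) ≠ j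
  · have hb : (decide ((k : Int) ≠ i) && decide ((k : Int) ≠ j)) = true := by
      simp [hk.1, hk.2]
    rw [if_pos hk, hb]
    simp [detsFrom]
  · have hb : (decide ((k : Int) ≠ i) && decide ((k : Int) ≠ j)) = false := by
      rcases not_and_or.mp hk with h' | h' <;> simp [h']
    rw [if_neg hk, hb]
    simp [detsFrom]

lemma aSpec_nil : aSpec [] = true := rfl

lemma aSpec_cons_zero (t : List Int) : aSpec (0 :: t) = aSpec t := by
  simp [aSpec, List.dropWhile_cons]

lemma aSpec_cons_nonzero (d : Int) (t : List Int) (h : d ≠ 0) :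
    aSpec (d :: t) = t.all (fun e => decide (0 < d) == decide (0 < e)) := by
  have hb : (d == 0) = false := by simpa using h
  simp [aSpec, List.dropWhile_cons, hb]

lemma bSpec_cons_zero (t : List Int) : bSpec (0 :: t) = bSpec t := by
  simp [bSpec]

lemma DSpec_cons_zero (t : List Int) : DSpec (0 :: t) ↔ DSpec t := by
  simp [DSpec, List.dropWhile_cons]

lemma checkRest_eq (L : List (List Int)) (i j : Int) (b : Bool) :
    ∀ n k, L.length - k = n →
      checkRest L i j b k = (detsFrom L i j k).all (fun e => b == decide (0 < e)) := by
  intro n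
  induction n with
  | zero =>
    intro k hk
    have h : ¬ k < L.length := by omega
    rw [checkRest, detsFrom_stop L i j k h]
    simp [h]
  | succ m ih =>
    intro k hk
    have h : k < L.length := by omega
    rw [checkRest, detsFrom_succ L i j k h]
    by_cases hcond : (k : Int) ≠ i ∧ (k : Int) ≠ j
    · rw [if_pos h, if_pos hcond, if_pos hcond, List.all_cons, ih (k + 1) (by omega)]
      by_cases hb : b = decide (0 < deterL (pvGetPt L i) (pvGetPt L j) (L.getD k []))
      · simp [hb]
      · have hbx : (b == decide (0 < deterL (pvGetPt L i) (pvGetPt L j) (L.getD k []))) = false :=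
          beq_eq_false_iff_ne.mpr hb
        rw [if_pos hb, hbx, Bool.false_and]
    · rw [if_pos h, if_neg hcond, if_neg hcond, ih (k + 1) (by omega)]

lemma findK_eq (L : List (List Int)) (i j : Int) :
    ∀ n k, L.length - k = n →
      (match findK L i j k with
        | some (p, d) => checkRest L i j (decide (0 < d)) (p + 1)
        | none => true) = aSpec (detsFrom L i j k) := by
  intro n
  induction n with
  | zero =>
    intro k hk
    have h : ¬ k < L.length := by omega
    rw [findK, detsFrom_stop L i j k h]
    simp [h, aSpec_nil]
  | succ m ih =>
    intro k hk
    have h : k < L.length := by omega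
    rw [findK, detsFrom_succ L i j k h]
    by_cases hcond : (k : Int) ≠ i ∧ (k : Int) ≠ j
    · rw [if_pos h, if_pos hcond, if_pos hcond]
      set d := deterL (pvGetPt L i) (pvGetPt L j) (L.getD k []) with hd
      by_cases hdz : d ≠ 0
      · rw [if_pos hdz, aSpec_cons_nonzero d _ hdz]
        exact checkRest_eq L i j (decide (0 < d)) (L.length - (k + 1)) (k + 1) rfl
      · push_neg at hdz
        rw [if_neg (by simp [hdz]), hdz, aSpec_cons_zero]
        exact ih (k + 1) (by omega)
    · rw [if_pos h, if_neg hcond, if_neg hcond]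
      exact ih (k + 1) (by omega)

lemma memeCote_char (L : List (List Int)) (i j : Int) :
    memeCote L i j = aSpec (detsOf L i j) := by
  rw [memeCote, ← detsFrom_zero]
  exact findK_eq L i j (L.length - 0) 0 rfl

lemma memeCote_alt_char (L : List (List Int)) (i j : Int) :
    memeCote_alt L i j = bSpec (detsOf L i j) := rfl

lemma det_nonqual (L : List (List Int)) (i j : Int) (k : Nat)
    (h : (↑k : Int) = i ∨ (↑k : Int) = j) :
    deterL (pvGetPt L i) (pvGetPt L j) (L.getD k []) = 0 := by
  have hP : ∀ z : Int, z = (↑k : Int) → pvGetPt L z = L.getD k [] := by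
    intro z hz
    subst hz
    rw [pvGetPt, PySem.List.pyGet?_natCast, List.getD_eq_getElem?_getD]
  rcases h with h | h
  · rw [hP i h.symm, deterL]; ring
  · rw [hP j h.symm, deterL]; ring

lemma zero_tail_iff (f : Nat → Int) :
    ∀ ks : List Nat, ks.Pairwise (· < ·) → (∀ k ∈ ks, 0 ≤ f k) →
      (0 ∈ ((ks.map f).dropWhile (fun x => x == 0)).drop 1 ↔
        ∃ p ∈ ks, ∃ q ∈ ks, p < q ∧ 0 < f p ∧ f q = 0) := by
  intro ks
  induction ks with
  | nil => simp
  | cons k t ih =>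
    intro hp hnn
    obtain ⟨hkt, hpt⟩ := List.pairwise_cons.mp hp
    by_cases h0 : f k = 0
    · have hstep : ((((k :: t).map f).dropWhile (fun x => x == 0)).drop 1)
          = ((t.map f).dropWhile (fun x => x == 0)).drop 1 := by
        have : (f k == 0) = true := by simpa using h0
        simp [List.dropWhile_cons, this]
      rw [hstep, ih hpt (fun x hx => hnn x (List.mem_cons_of_mem _ hx))]
      constructor
      · rintro ⟨p, hp', q, hq', h⟩
        exact ⟨p, List.mem_cons_of_mem _ hp', q, List.mem_cons_of_mem _ hq', h⟩
      · rintro ⟨p, hp', q, hq', hlt, hpos, hz⟩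
        rcases List.mem_cons.mp hp' with h' | h'
        · subst h'; rw [h0] at hpos; exact absurd hpos (by omega)
        · rcases List.mem_cons.mp hq' with h'' | h''
          · subst h''; exact absurd (hkt p h') (by omega)
          · exact ⟨p, h', q, h'', hlt, hpos, hz⟩
    · have hkpos : 0 < f k := lt_of_le_of_ne (hnn k (List.mem_cons_self ..)) (Ne.symm h0)
      have hstep : ((((k :: t).map f).dropWhile (fun x => x == 0)).drop 1) = t.map f := by
        have : (f k == 0) = false := by simpa using h0
        simp [List.dropWhile_cons, this]
      rw [hstep]
      constructor
      · intro hmem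
        obtain ⟨q, hq, hfq⟩ := List.mem_map.mp hmem
        exact ⟨k, List.mem_cons_self .., q, List.mem_cons_of_mem _ hq, hkt q hq, hkpos, hfq⟩
      · rintro ⟨p, _, q, hq', _, _, hz⟩
        rcases List.mem_cons.mp hq' with h'' | h''
        · subst h''; exact absurd hz h0
        · exact List.mem_map.mpr ⟨q, h'', hz⟩

lemma D_char (L : List (List Int)) (i j : Int) :
    D_memeCote L i j ↔ DSpec (detsOf L i j) := by
  unfold D_memeCote DSpec detsOf
  set s := fun k => deterL (pvGetPt L i) (pvGetPt L j) (L.getD k []) with hs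
  set ks := (List.range L.length).filter
      (fun (k : Nat) => decide ((↑k : Int) ≠ i) && decide ((↑k : Int) ≠ j)) with hks
  have hmem : ∀ k : Nat, k ∈ ks ↔ k < L.length ∧ (↑k : Int) ≠ i ∧ (↑k : Int) ≠ j := by
    intro k
    simp [hks, List.mem_filter, List.mem_range, and_assoc]
  have hpair : ks.Pairwise (· < ·) := List.Pairwise.filter _ (List.pairwise_lt_range)
  constructor
  · rintro ⟨h1, q, hqlt, hqi, hqj, hz, p, hlt, hpos⟩
    have hnn' : ∀ k ∈ ks, 0 ≤ s k := fun k hk => h1 k ((hmem k).mp hk).1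
    refine ⟨?_, ?_⟩
    · intro d hd
      obtain ⟨k, hk, hfk⟩ := List.mem_map.mp hd
      exact hfk ▸ hnn' k hk
    · refine (zero_tail_iff s ks hpair hnn').mpr ?_
      have hpq : (↑p : Int) ≠ i ∧ (↑p : Int) ≠ j := by
        by_contra hcon
        have : s p = 0 := by
          rcases not_and_or.mp hcon with h' | h' <;>
            exact det_nonqual L i j p (by push_neg at h'; tauto)
        omega
      exact ⟨p, (hmem p).mpr ⟨by omega, hpq.1, hpq.2⟩, q,
        (hmem q).mpr ⟨hqlt, Ne.symm hqi, Ne.symm hqj⟩, hlt, hpos, hz⟩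
  · rintro ⟨hnn, htail⟩
    have hnn' : ∀ k ∈ ks, 0 ≤ s k := by
      intro k hk
      exact hnn _ (List.mem_map.mpr ⟨k, hk, rfl⟩)
    have h1 : ∀ k < L.length, 0 ≤ s k := by
      intro k hk
      by_cases hq : (↑k : Int) ≠ i ∧ (↑k : Int) ≠ j
      · exact hnn' k ((hmem k).mpr ⟨hk, hq.1, hq.2⟩)
      · have : s k = 0 :=
          det_nonqual L i j k (by rcases not_and_or.mp hq with h' | h' <;> push_neg at h' <;> tauto)
        omega
    refine ⟨h1, ?_⟩
    obtain ⟨p, hp', q, hq', hlt, hpos, hz⟩ := (zero_tail_iff s ks hpair hnn').mp htail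
    obtain ⟨hqlt, hqi, hqj⟩ := (hmem q).mp hq'
    exact ⟨q, hqlt, Ne.symm hqi, Ne.symm hqj, hz, p, hlt, hpos⟩

lemma main_agree : ∀ ds : List Int, ¬ DSpec ds → aSpec ds = bSpec ds := by
  intro ds
  induction ds with
  | nil => intro _; decide
  | cons d t ih =>
    intro hD
    by_cases hd : d = 0
    · subst hd
      rw [aSpec_cons_zero, bSpec_cons_zero]
      exact ih (fun h => hD ((DSpec_cons_zero t).mpr h))
    · rw [aSpec_cons_nonzero d t hd]
      have hne : (d == 0) = false := by simpa using hd
      by_cases hdp : 0 < d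
      · -- first nonzero determinant is positive
        have hDd : ¬ ((∀ x ∈ d :: t, 0 ≤ x) ∧ 0 ∈ t) := by
          intro ⟨h1, h2⟩
          refine hD ⟨h1, ?_⟩
          simpa [List.dropWhile_cons, hne] using h2
        by_cases hneg : ∃ e ∈ t, e < 0
        · obtain ⟨e, he, hel⟩ := hneg
          have h1 : (t.all fun e => decide (0 < d) == decide (0 < e)) = false := by
            simp only [List.all_eq_false]
            refine ⟨e, he, ?_⟩
            simp only [decide_eq_true hdp]
            simp; omega
          have hA : ((d :: t).any fun x => decide (0 < x)) = true := by
            simp only [List.any_eq_true]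
            exact ⟨d, List.mem_cons_self .., by simpa using hdp⟩
          have hB : ((d :: t).any fun x => decide (x < 0)) = true := by
            simp only [List.any_eq_true]
            exact ⟨e, List.mem_cons_of_mem _ he, by simpa using hel⟩
          simp [bSpec, hA, hB, h1]
        · push_neg at hneg
          have hz : 0 ∉ t := by
            intro h0
            refine hDd ⟨?_, h0⟩
            intro x hx
            rcases List.mem_cons.mp hx with h' | h'
            · subst h'; omega
            · exact hneg x h'
          have hall : ∀ e ∈ t, 0 < e := by
            intro e he
            rcases lt_or_eq_of_le (hneg e he) with h' | h'
            · exact h'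
            · exact absurd (h' ▸ he) hz
          have h1 : (t.all fun e => decide (0 < d) == decide (0 < e)) = true := by
            simp only [List.all_eq_true]
            intro e he; simp [hdp, hall e he]
          have hB : ((d :: t).any fun x => decide (x < 0)) = false := by
            simp only [List.any_eq_false]
            intro x hx
            rcases List.mem_cons.mp hx with h' | h'
            · subst h'; simp; omega
            · have := hall x h'; simp; omega
          simp [bSpec, hB, h1]
      · -- first nonzero determinant is negative
        have hdn : d < 0 := by omega
        have hp : decide (0 < d) = false := by simpa using hdp
        have hn : decide (d < 0) = true := by simpa using hdn
        have h2 : bSpec (d :: t) = !(t.any fun e => decide (0 < e)) := by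
          simp [bSpec, hp, hn]
        rw [h2, hp]
        clear hD ih hne hdp hdn hp hn h2 hd
        induction t with
        | nil => decide
        | cons e t' ih' =>
          simp only [Bool.false_beq] at ih' ⊢
          rw [List.all_cons, List.any_cons, Bool.not_or, ih']

lemma main_diff : ∀ ds : List Int, DSpec ds → aSpec ds = false ∧ bSpec ds = true := by
  intro ds
  induction ds with
  | nil => intro h; exact absurd h (by simp [DSpec])
  | cons d t ih =>
    intro hD
    by_cases hd : d = 0
    · subst hd
      rw [aSpec_cons_zero, bSpec_cons_zero]
      exact ih ((DSpec_cons_zero t).mp hD)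
    · have hne : (d == 0) = false := by simpa using hd
      obtain ⟨hall, hmem⟩ := hD
      rw [List.dropWhile_cons, hne] at hmem
      simp only [Bool.false_eq_true, if_false, List.drop_one, List.tail_cons] at hmem
      have hdp : 0 < d := lt_of_le_of_ne (hall d (List.mem_cons_self ..)) (Ne.symm hd)
      constructor
      · rw [aSpec_cons_nonzero d t hd]
        simp only [List.all_eq_false]
        refine ⟨0, hmem, ?_⟩
        simp [hdp]
      · have hB : ((d :: t).any fun x => decide (x < 0)) = false := by
          simp only [List.any_eq_false]
          intro x hx
          have := hall x hx
          simp; omega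
        simp [bSpec, hB]

-- ===== VERDICT (by name: the statement is the Claim_ definition above) =====
theorem memeCote_spec : Claim_unchanged_memeCote := by
  intro L i j _ _ hD
  rw [memeCote_char, memeCote_alt_char]
  exact main_agree _ (fun h => hD ((D_char L i j).mpr h))

theorem memeCote_changed : Claim_changed_memeCote := by
  unfold Claim_changed_memeCote
  refine ⟨by decide, by decide, by decide, ?_, by decide, by decide⟩
  rw [memeCote_char]
  decide

theorem memeCote_tight : Claim_exact_memeCote := by
  intro L i j _ _ hD
  rw [memeCote_char, memeCote_alt_char]
  obtain ⟨h1, h2⟩ := main_diff _ ((D_char L i j).mp hD)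
  rw [h1, h2]
  decide
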